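-- pv_equiv track=rewrite | github.com/norchcode/ai-qa-agent | src/visual_testing.py | _extract_differences_from_text
-- ===== SOURCE A (Python) =====
-- from typing import Dict, List, Any, Optional, Union, Tuple
--
-- def _extract_differences_from_text(text: str) -> List[Dict[str, Any]]:
--     """
--     Extract differences from text output when JSON parsing fails.
--
--     Args:
--         text: The text output from the LLM.
--
--     Returns:
--         List of differences extracted from the text.
--     """
--     differences = []
--     current_diff = {}
--
--     for line in text.split('\n'):
--         line = line.strip()
--         if not line:
--             continue
--
--         if line.startswith('Difference') or line.startswith('Issue') or line.startswith('-'):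
--             if current_diff and 'description' in current_diff:
--                 differences.append(current_diff)
--             current_diff = {'description': line}
--         elif 'severity' in line.lower():
--             for severity in ['low', 'medium', 'high']:
--                 if severity in line.lower():
--                     current_diff['severity'] = severity.capitalize()
--                     break
--         elif 'impact' in line.lower():
--             current_diff['impact'] = line
--         elif 'fix' in line.lower() or 'suggestion' in line.lower():
--             current_diff['suggestion'] = line
--
--     if current_diff and 'description' in current_diff:
--         differences.append(current_diff)
--
--     return differences if differences else [{"description": text}]
-- ===== SOURCE B (Python) =====
-- # Block-based decomposition: split lines into header-led blocks first, then map each block to a dict.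
-- def _is_header(line):
--     return line.startswith('Difference') or line.startswith('Issue') or line.startswith('-')
--
--
-- def _blocks(lines):
--     """Split the (stripped, non-empty) lines into blocks, each led by a header line;
--     lines before the first header are dropped."""
--     if not lines:
--         return []
--     if not _is_header(lines[0]):
--         return _blocks(lines[1:])
--     rest = lines[1:]
--     k = 0
--     while k < len(rest) and not _is_header(rest[k]):
--         k += 1
--     return [[lines[0]] + rest[:k]] + _blocks(rest[k:])
--
--
-- def _block_to_diff(block):
--     diff = {'description': block[0]}
--     for line in block[1:]:
--         low = line.lower()
--         if 'severity' in low: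
--             for severity in ('low', 'medium', 'high'):
--                 if severity in low:
--                     diff['severity'] = severity.capitalize()
--                     break
--         elif 'impact' in low:
--             diff['impact'] = line
--         elif 'fix' in low or 'suggestion' in low:
--             diff['suggestion'] = line
--     return diff
--
--
-- def _extract_differences_from_text(text):
--     lines = [s for s in (raw.strip() for raw in text.split('\n')) if s]
--     diffs = [_block_to_diff(b) for b in _blocks(lines)]
--     return diffs if diffs else [{"description": text}]
-- ===== Notes on version B (the rewrite author's own statement) =====
-- stated objective: alternative
-- what changed: B replaces A's single stateful loop (carrying the current partial dict across lines) by a two-phase decomposition: it first cleans the lines and splits them into header-led blocks, then maps each block independently to its dict, with the same raw-text fallback.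
import Mathlib
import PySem

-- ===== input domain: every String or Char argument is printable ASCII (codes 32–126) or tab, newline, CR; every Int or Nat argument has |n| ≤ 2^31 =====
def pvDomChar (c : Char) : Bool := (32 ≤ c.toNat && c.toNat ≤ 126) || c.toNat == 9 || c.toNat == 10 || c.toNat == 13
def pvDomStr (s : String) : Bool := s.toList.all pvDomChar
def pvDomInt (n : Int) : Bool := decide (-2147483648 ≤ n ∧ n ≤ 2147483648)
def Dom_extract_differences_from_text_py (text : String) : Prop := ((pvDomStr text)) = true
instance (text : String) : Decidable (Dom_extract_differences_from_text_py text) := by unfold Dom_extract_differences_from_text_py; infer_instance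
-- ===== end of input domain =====

-- B re-implements the same parse by a block decomposition (split lines into header-led blocks, then map each
-- block to a dict); same return value, no speed claim.

-- str.capitalize(): first char uppercased, the rest lowered — hand port, exact on ASCII (only ever
-- applied to the lowercase literals 'low'/'medium'/'high' here).
def pvCapitalize (s : String) : String :=
  match s.toList with
  | [] => ""
  | c :: cs => String.ofList (PySem.Chars.upperChar c :: PySem.Chars.lower cs)

-- ===== PORT A =====
-- the loop body for one stripped, non-empty line
def pvStepLineA (st : List (PySem.Dict String String) × PySem.Dict String String) (line : String) :
    List (PySem.Dict String String) × PySem.Dict String String :=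
  if PySem.Str.startswith line "Difference" || PySem.Str.startswith line "Issue" ||
      PySem.Str.startswith line "-" then
    ((if st.2.items ≠ [] ∧ st.2.contains "description" = true then st.1 ++ [st.2] else st.1),
     PySem.Dict.empty.insert "description" line)
  else if PySem.Str.isIn "severity" (PySem.Str.lower line) then
    (st.1,
      match ["low", "medium", "high"].find? (fun sev => PySem.Str.isIn sev (PySem.Str.lower line)) with
      | some sev => st.2.insert "severity" (pvCapitalize sev)
      | none => st.2)
  else if PySem.Str.isIn "impact" (PySem.Str.lower line) then
    (st.1, st.2.insert "impact" line)
  else if PySem.Str.isIn "fix" (PySem.Str.lower line) ||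
      PySem.Str.isIn "suggestion" (PySem.Str.lower line) then
    (st.1, st.2.insert "suggestion" line)
  else st

-- 'line = raw.strip(); if not line: continue'
def pvStepA (st : List (PySem.Dict String String) × PySem.Dict String String) (raw : String) :
    List (PySem.Dict String String) × PySem.Dict String String :=
  let line := PySem.Str.strip raw
  if line = "" then st else pvStepLineA st line

def extract_differences_from_text_py (text : String) : List (List (String × String)) :=
  let st := ((PySem.Str.split? text "\n").getD []).foldl pvStepA ([], PySem.Dict.empty)
  let differences :=
    if st.2.items ≠ [] ∧ st.2.contains "description" = true then st.1 ++ [st.2] else st.1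
  if differences ≠ [] then differences.map PySem.Dict.items else [[("description", text)]]

-- ===== PORT B =====
def pvIsHeader (line : String) : Bool :=
  PySem.Str.startswith line "Difference" || PySem.Str.startswith line "Issue" ||
    PySem.Str.startswith line "-"

-- split the cleaned lines into header-led blocks; lines before the first header are dropped
def pvBlocks : List String → List (List String)
  | [] => []
  | l :: ls =>
    if pvIsHeader l then
      (l :: ls.takeWhile (fun x => !pvIsHeader x)) :: pvBlocks (ls.dropWhile (fun x => !pvIsHeader x))
    else pvBlocks ls
termination_by ls => ls.length
decreasing_by
  · exact Nat.lt_succ_of_le (List.length_dropWhile_le _ _)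
  · exact Nat.lt_succ_of_le (Nat.le_refl _)

def pvAttrStep (diff : PySem.Dict String String) (line : String) : PySem.Dict String String :=
  let low := PySem.Str.lower line
  if PySem.Str.isIn "severity" low then
    match ["low", "medium", "high"].find? (fun sev => PySem.Str.isIn sev low) with
    | some sev => diff.insert "severity" (pvCapitalize sev)
    | none => diff
  else if PySem.Str.isIn "impact" low then diff.insert "impact" line
  else if PySem.Str.isIn "fix" low || PySem.Str.isIn "suggestion" low then
    diff.insert "suggestion" line
  else diff

def pvBlockToDiff : List String → PySem.Dict String String
  | [] => PySem.Dict.empty  -- unreachable: every block starts with its header line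
  | h :: rest => rest.foldl pvAttrStep (PySem.Dict.empty.insert "description" h)

def extract_differences_from_text_py_alt (text : String) : List (List (String × String)) :=
  let lines := (((PySem.Str.split? text "\n").getD []).map PySem.Str.strip).filter (fun s => s ≠ "")
  let diffs := (pvBlocks lines).map pvBlockToDiff
  if diffs ≠ [] then diffs.map PySem.Dict.items else [[("description", text)]]

-- ===== PRECONDITION & SPEC =====
def Spec_extract_differences_from_text_py (text : String) (out : List (List (String × String))) : Prop := out = extract_differences_from_text_py_alt text
instance (text : String) (out : List (List (String × String))) : Decidable (Spec_extract_differences_from_text_py text out) := by unfold Spec_extract_differences_from_text_py; infer_instance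

-- ===== CLAIM (what is proved, stated in full; the proofs are below) =====
def Claim_equal_extract_differences_from_text_py : Prop := ∀ (text : String), Dom_extract_differences_from_text_py text → Spec_extract_differences_from_text_py text (extract_differences_from_text_py text)

-- ===== LEMMAS AND PROOFS =====

-- A's trailing flush
def pvFinish (st : List (PySem.Dict String String) × PySem.Dict String String) :
    List (PySem.Dict String String) :=
  if st.2.items ≠ [] ∧ st.2.contains "description" = true then st.1 ++ [st.2] else st.1

theorem pvStepLineA_eq (st : List (PySem.Dict String String) × PySem.Dict String String)
    (l : String) :
    pvStepLineA st l =
      if pvIsHeader l then (pvFinish st, PySem.Dict.empty.insert "description" l)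
      else (st.1, pvAttrStep st.2 l) := by
  simp only [pvStepLineA, pvIsHeader, pvAttrStep, pvFinish]
  split_ifs <;> rfl

theorem pvInsert_items_ne_nil (d : PySem.Dict String String) (k v : String) :
    (d.insert k v).items ≠ [] := by
  rw [PySem.Dict.items_insert]
  split_ifs with hc
  · have hk := (PySem.Dict.contains_iff_mem_keys d k).mp hc
    simp only [PySem.Dict.keys] at hk
    obtain ⟨p, hp, -⟩ := List.mem_map.mp hk
    intro h0
    rw [List.map_eq_nil_iff] at h0
    simp [h0] at hp
  · simp

theorem pvAttrStep_contains (d : PySem.Dict String String) (l : String) :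
    (pvAttrStep d l).contains "description" = d.contains "description" := by
  simp only [pvAttrStep]
  split_ifs
  · cases ["low", "medium", "high"].find? (fun sev => PySem.Str.isIn sev (PySem.Str.lower l)) with
    | none => rfl
    | some sev => simp [PySem.Dict.contains_insert]
  · simp [PySem.Dict.contains_insert]
  · simp [PySem.Dict.contains_insert]
  · rfl

theorem pvAttrStep_items_ne_nil (d : PySem.Dict String String) (l : String)
    (h : d.items ≠ []) : (pvAttrStep d l).items ≠ [] := by
  simp only [pvAttrStep]
  split_ifs
  · cases ["low", "medium", "high"].find? (fun sev => PySem.Str.isIn sev (PySem.Str.lower l)) with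
    | none => exact h
    | some sev => exact pvInsert_items_ne_nil _ _ _
  · exact pvInsert_items_ne_nil _ _ _
  · exact pvInsert_items_ne_nil _ _ _
  · exact h

theorem pvBlocks_nil : pvBlocks [] = [] := by
  rw [pvBlocks]

theorem pvBlocks_cons_header (l : String) (ls : List String) (h : pvIsHeader l = true) :
    pvBlocks (l :: ls) =
      (l :: ls.takeWhile (fun x => !pvIsHeader x)) ::
        pvBlocks (ls.dropWhile (fun x => !pvIsHeader x)) := by
  rw [pvBlocks]; simp [h]

theorem pvBlocks_cons_not (l : String) (ls : List String) (h : pvIsHeader l = false) :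
    pvBlocks (l :: ls) = pvBlocks ls := by
  rw [pvBlocks]; simp [h]

theorem pvM2 (ls : List String) (ds : List (PySem.Dict String String))
    (cur : PySem.Dict String String) (hc : cur.contains "description" = true)
    (hne : cur.items ≠ []) :
    pvFinish (ls.foldl pvStepLineA (ds, cur)) =
      ds ++ [(ls.takeWhile (fun x => !pvIsHeader x)).foldl pvAttrStep cur] ++
        (pvBlocks (ls.dropWhile (fun x => !pvIsHeader x))).map pvBlockToDiff := by
  induction ls generalizing ds cur with
  | nil => simp [pvFinish, hc, hne, pvBlocks_nil]
  | cons l ls ih =>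
    by_cases hh : pvIsHeader l = true
    · have hstep : pvStepLineA (ds, cur) l =
          (ds ++ [cur], PySem.Dict.empty.insert "description" l) := by
        rw [pvStepLineA_eq, if_pos hh]
        simp [pvFinish, hc, hne]
      rw [List.foldl_cons, hstep,
        ih (ds ++ [cur]) (PySem.Dict.empty.insert "description" l)
          (PySem.Dict.contains_insert_self _ _ _) (pvInsert_items_ne_nil _ _ _)]
      rw [List.takeWhile_cons, List.dropWhile_cons]
      simp only [hh, Bool.not_true, Bool.false_eq_true, if_false]
      rw [pvBlocks_cons_header l ls hh]
      simp [pvBlockToDiff, List.append_assoc]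
    · have hh' : pvIsHeader l = false := by simp at hh; simp [hh]
      have hstep : pvStepLineA (ds, cur) l = (ds, pvAttrStep cur l) := by
        rw [pvStepLineA_eq, if_neg (by simp [hh'])]
      rw [List.foldl_cons, hstep,
        ih ds (pvAttrStep cur l) (by rw [pvAttrStep_contains, hc])
          (pvAttrStep_items_ne_nil _ _ hne)]
      rw [List.takeWhile_cons, List.dropWhile_cons]
      simp [hh']

theorem pvM1 (ls : List String) (ds : List (PySem.Dict String String))
    (cur : PySem.Dict String String) (hc : cur.contains "description" = false) :
    pvFinish (ls.foldl pvStepLineA (ds, cur)) = ds ++ (pvBlocks ls).map pvBlockToDiff := by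
  induction ls generalizing ds cur with
  | nil => simp [pvFinish, hc, pvBlocks_nil]
  | cons l ls ih =>
    by_cases hh : pvIsHeader l = true
    · have hstep : pvStepLineA (ds, cur) l =
          (ds, PySem.Dict.empty.insert "description" l) := by
        rw [pvStepLineA_eq, if_pos hh]
        simp [pvFinish, hc]
      rw [List.foldl_cons, hstep,
        pvM2 ls ds (PySem.Dict.empty.insert "description" l)
          (PySem.Dict.contains_insert_self _ _ _) (pvInsert_items_ne_nil _ _ _)]
      rw [pvBlocks_cons_header l ls hh]
      simp [pvBlockToDiff, List.append_assoc]
    · have hh' : pvIsHeader l = false := by simp at hh; simp [hh]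
      have hstep : pvStepLineA (ds, cur) l = (ds, pvAttrStep cur l) := by
        rw [pvStepLineA_eq, if_neg (by simp [hh'])]
      rw [List.foldl_cons, hstep,
        ih ds (pvAttrStep cur l) (by rw [pvAttrStep_contains, hc]),
        pvBlocks_cons_not l ls hh']

theorem pvFoldA (ls : List String)
    (st : List (PySem.Dict String String) × PySem.Dict String String) :
    ls.foldl pvStepA st =
      ((ls.map PySem.Str.strip).filter (fun s => s ≠ "")).foldl pvStepLineA st := by
  induction ls generalizing st with
  | nil => rfl
  | cons l ls ih =>
    by_cases h : PySem.Str.strip l = ""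
    · simp [pvStepA, h, ih]
    · simp [pvStepA, h, ih]

-- ===== VERDICT (by name: the statement is the Claim_ definition above) =====
theorem extract_differences_from_text_py_spec : Claim_equal_extract_differences_from_text_py := by
  intro text _
  show extract_differences_from_text_py text = extract_differences_from_text_py_alt text
  simp only [extract_differences_from_text_py, extract_differences_from_text_py_alt]
  rw [pvFoldA]
  have h := pvM1 (((((PySem.Str.split? text "\n").getD [])).map PySem.Str.strip).filter
      (fun s => s ≠ "")) [] PySem.Dict.empty (PySem.Dict.contains_empty _)
  unfold pvFinish at h
  simp only [List.nil_append] at h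
  rw [h]
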